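-- pv_equiv track=rewrite | github.com/chansuixi/MCPAgentEmdoor | dataset_format/toolbench_dataset_format_service.py | get_odd_and_even_pair
-- ===== SOURCE A (Python) =====
-- from math import ceil
-- from typing import List
--
-- def get_odd_and_even_pair(content: List[str]):
--     result = []
--     for i in range(ceil(len(content) / float(2))):
--         if i >= int(len(content) / 2):
--             odd_content, even_content = content[len(content) - 1], ""
--         else:
--             # 不是最后一个
--             odd_content, even_content = content[2 * i], content[2 * i + 1]
--         result.append([odd_content, even_content])
--     return result
-- ===== SOURCE B (Python) =====
-- from typing import List
--
--
-- def get_odd_and_even_pair(content: List[str]):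
--     evens = content[::2]
--     odds = content[1::2]
--     if len(evens) > len(odds):
--         odds = odds + [""]
--     return [[a, b] for a, b in zip(evens, odds)]
-- ===== Notes on version B (the rewrite author's own statement) =====
-- stated objective: idiomatic
-- what changed: Replaces the ceil/floor index-arithmetic loop with its last-element special case by two strided slices (content[::2], content[1::2]) padded and zipped in one pass.
import Mathlib
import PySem

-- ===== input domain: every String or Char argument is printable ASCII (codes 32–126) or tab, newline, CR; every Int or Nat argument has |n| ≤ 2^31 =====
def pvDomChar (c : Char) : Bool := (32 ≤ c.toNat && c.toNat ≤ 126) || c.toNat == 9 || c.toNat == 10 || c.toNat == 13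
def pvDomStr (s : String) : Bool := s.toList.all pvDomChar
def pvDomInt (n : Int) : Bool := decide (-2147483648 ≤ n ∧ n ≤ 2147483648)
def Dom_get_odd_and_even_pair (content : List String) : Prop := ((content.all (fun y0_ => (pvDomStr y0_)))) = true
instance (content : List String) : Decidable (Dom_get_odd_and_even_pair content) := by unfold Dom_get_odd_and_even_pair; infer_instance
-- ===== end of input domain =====

-- B replaces A's ceil/floor index-arithmetic loop (with its last-element branch) by two strided
-- slices zipped together with padding; same result, more idiomatic decomposition.


-- ===== PORT A =====
-- `ceil(len(content)/float(2))` is ported as (n+1)//2 and `int(len(content)/2)` as n//2: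
-- both are exact (the float division of a nonnegative length by 2.0 is exact and its
-- ceil/truncation agree with these integer formulas). All list indices A uses are in
-- range on every input, so the pyGetD default "" is never consulted.
def get_odd_and_even_pair (content : List String) : List (List String) :=
  let n : Int := content.length
  (PySem.List.pyRange 0 (PySem.Int.floordiv (n + 1) 2) 1).foldl
    (fun result i =>
      result ++ [if PySem.Int.floordiv n 2 ≤ i
        then [PySem.List.pyGetD content (n - 1) "", ""]
        else [PySem.List.pyGetD content (2 * i) "", PySem.List.pyGetD content (2 * i + 1) ""]])
    []

-- ===== PORT B =====
-- content[::2] / content[1::2]; step 2 ≠ 0, so slice? is never none and .getD [] is never consulted.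
def get_odd_and_even_pair_alt (content : List String) : List (List String) :=
  let evens := (PySem.List.slice? content none none 2).getD []
  let odds := (PySem.List.slice? content (some 1) none 2).getD []
  let odds2 := if odds.length < evens.length then odds ++ [""] else odds
  (evens.zip odds2).map (fun p => [p.1, p.2])

-- ===== PRECONDITION & SPEC =====
def Spec_get_odd_and_even_pair (content : List String) (out : List (List String)) : Prop := out = get_odd_and_even_pair_alt content
instance (content : List String) (out : List (List String)) : Decidable (Spec_get_odd_and_even_pair content out) := by unfold Spec_get_odd_and_even_pair; infer_instance

-- ===== CLAIM (what is proved, stated in full; the proofs are below) =====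
def Claim_equal_get_odd_and_even_pair : Prop := ∀ (content : List String), Dom_get_odd_and_even_pair content → Spec_get_odd_and_even_pair content (get_odd_and_even_pair content)

-- ===== LEMMAS AND PROOFS =====

-- common reference shape: pair up two at a time, pad an odd tail with ""
def pvPairs : List String → List (List String)
  | [] => []
  | [a] => [[a, ""]]
  | a :: b :: r => [a, b] :: pvPairs r

-- the even-index slice content[::2]
def pvE (xs : List String) : List String := (PySem.List.slice? xs none none 2).getD []
-- the odd-index slice content[1::2]
def pvO (xs : List String) : List String := (PySem.List.slice? xs (some 1) none 2).getD []

theorem pvE_eq (xs : List String) :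
    pvE xs = (List.range ((xs.length + 1) / 2)).filterMap (fun k => xs[2 * k]?) := by
  rcases xs with _ | ⟨a, t⟩
  · decide
  · simp only [pvE, PySem.List.slice?, PySem.List.sliceIndices]
    norm_num
    rw [show (((t.length : Int) + 1 + 2 - 1) / 2).toNat = (t.length + 1 + 1) / 2 by omega]
    congr 1

theorem pvO_eq (xs : List String) :
    pvO xs = (List.range (xs.length / 2)).filterMap (fun k => xs[2 * k + 1]?) := by
  rcases xs with _ | ⟨a, t⟩
  · decide
  · simp only [pvO, PySem.List.slice?, PySem.List.sliceIndices]
    norm_num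
    rcases Nat.eq_zero_or_pos t.length with h0 | h0
    · rw [if_neg (by omega), show (t.length + 1) / 2 = 0 by omega]
      simp
    · rw [if_pos (by exact_mod_cast h0), show (((t.length : Int) + 2 - 1) / 2).toNat = (t.length + 1) / 2 by omega]
      congr 1
      funext k
      rw [show ((1 : Int) + 2 * (k : Int)).toNat = 2 * k + 1 by omega]
      simp

theorem pvE_cons (a b : String) (r : List String) : pvE (a :: b :: r) = a :: pvE r := by
  rw [pvE_eq, pvE_eq]
  have h : ((a :: b :: r).length + 1) / 2 = (r.length + 1) / 2 + 1 := by simp; omega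
  rw [h, List.range_succ_eq_map, List.filterMap_cons, List.filterMap_map]
  simp only [Nat.mul_zero, List.getElem?_cons_zero]
  congr 1

theorem pvO_cons (a b : String) (r : List String) : pvO (a :: b :: r) = b :: pvO r := by
  rw [pvO_eq, pvO_eq]
  have h : (a :: b :: r).length / 2 = r.length / 2 + 1 := by simp; omega
  rw [h, List.range_succ_eq_map, List.filterMap_cons, List.filterMap_map]
  simp only [Nat.mul_zero, Nat.zero_add, List.getElem?_cons_succ, List.getElem?_cons_zero]
  congr 1

theorem pvE_nil : pvE [] = [] := by decide

theorem pvE_one (a : String) : pvE [a] = [a] := by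
  simp [pvE, PySem.List.slice?, PySem.List.sliceIndices]

theorem pvO_nil : pvO [] = [] := by decide

theorem pvO_one (a : String) : pvO [a] = [] := by
  simp [pvO, PySem.List.slice?, PySem.List.sliceIndices]

theorem pvE_len (xs : List String) : (pvE xs).length = (xs.length + 1) / 2 := by
  induction xs using pvPairs.induct with
  | case1 => simp [pvE_nil]
  | case2 a => simp [pvE_one]
  | case3 a b r ih => rw [pvE_cons]; simp [ih]; omega

theorem pvO_len (xs : List String) : (pvO xs).length = xs.length / 2 := by
  induction xs using pvPairs.induct with
  | case1 => simp [pvO_nil]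
  | case2 a => simp [pvO_one]
  | case3 a b r ih => rw [pvO_cons]; simp [ih]; omega

theorem alt_def (xs : List String) :
    get_odd_and_even_pair_alt xs =
      ((pvE xs).zip (if (pvO xs).length < (pvE xs).length then pvO xs ++ [""] else pvO xs)).map
        (fun p => [p.1, p.2]) := rfl

theorem alt_eq_pairs (xs : List String) : get_odd_and_even_pair_alt xs = pvPairs xs := by
  induction xs using pvPairs.induct with
  | case1 => decide
  | case2 a => rw [alt_def, pvE_one, pvO_one]; simp [pvPairs]
  | case3 a b r ih =>
      rw [alt_def, pvE_cons, pvO_cons] at *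
      simp only [List.length_cons, pvE_len, pvO_len] at ih ⊢
      by_cases h : r.length / 2 < (r.length + 1) / 2
      · rw [if_pos (by omega : r.length / 2 + 1 < (r.length + 1) / 2 + 1)] at ⊢
        rw [if_pos h] at ih
        simp only [List.cons_append, List.zip_cons_cons, List.map_cons, pvPairs]
        rw [← ih]
      · rw [if_neg (by omega : ¬ r.length / 2 + 1 < (r.length + 1) / 2 + 1)] at ⊢
        rw [if_neg h] at ih
        simp only [List.zip_cons_cons, List.map_cons, pvPairs]
        rw [← ih]

theorem a_eq_map (xs : List String) :
    get_odd_and_even_pair xs = (List.range ((xs.length + 1) / 2)).map (fun k =>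
      if xs.length / 2 ≤ k then [xs.getD (xs.length - 1) "", ""]
      else [xs.getD (2 * k) "", xs.getD (2 * k + 1) ""]) := by
  unfold get_odd_and_even_pair
  rw [PySem.List.foldl_append_singleton_eq_map, PySem.List.pyRange_one, List.map_map]
  have hM : ((PySem.Int.floordiv (↑xs.length + 1) 2) - 0).toNat = (xs.length + 1) / 2 := by
    rw [PySem.Int.floordiv_eq_ediv_of_pos (by omega)]
    omega
  rw [hM]
  simp only [List.nil_append]
  apply List.map_congr_left
  intro k hk
  simp only [List.mem_range] at hk
  simp only [Function.comp_apply, zero_add]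
  rw [PySem.Int.floordiv_eq_ediv_of_pos (by omega)]
  by_cases h : xs.length / 2 ≤ k
  · rw [if_pos (by omega : (↑xs.length : Int) / 2 ≤ ↑k), if_pos h]
    have hlen : 1 ≤ xs.length := by omega
    have : (↑xs.length - 1 : Int) = ((xs.length - 1 : Nat) : Int) := by omega
    rw [this, PySem.List.pyGetD_natCast]
  · rw [if_neg (by omega : ¬ (↑xs.length : Int) / 2 ≤ ↑k), if_neg h]
    have h1 : (2 * (↑k : Int)) = ((2 * k : Nat) : Int) := by push_cast; ring
    have h2 : (2 * (↑k : Int) + 1) = ((2 * k + 1 : Nat) : Int) := by push_cast; ring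
    rw [h2, h1, PySem.List.pyGetD_natCast, PySem.List.pyGetD_natCast]

theorem a_eq_pairs (xs : List String) : get_odd_and_even_pair xs = pvPairs xs := by
  induction xs using pvPairs.induct with
  | case1 => decide
  | case2 a => rw [a_eq_map]; simp [pvPairs]
  | case3 a b r ih =>
      rw [a_eq_map] at *
      have h : ((a :: b :: r).length + 1) / 2 = (r.length + 1) / 2 + 1 := by simp; omega
      rw [h, List.range_succ_eq_map, List.map_cons, List.map_map]
      have h0 : ¬ (a :: b :: r).length / 2 ≤ 0 := by simp
      rw [if_neg h0]
      simp only [Nat.mul_zero, List.getD_cons_zero, Nat.zero_add, List.getD_cons_succ,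
        List.getD_cons_zero, pvPairs]
      congr 1
      rw [← ih]
      apply List.map_congr_left
      intro k hk
      simp only [List.mem_range] at hk
      simp only [Function.comp_apply]
      have hcond : ((a :: b :: r).length / 2 ≤ Nat.succ k) ↔ (r.length / 2 ≤ k) := by
        simp; omega
      by_cases h2 : r.length / 2 ≤ k
      · rw [if_pos (hcond.mpr h2), if_pos h2]
        have hodd : 1 ≤ r.length := by omega
        rw [show (a :: b :: r).length - 1 = (r.length - 1) + 1 + 1 by simp; omega]
        simp
      · rw [if_neg (fun hh => h2 (hcond.mp hh)), if_neg h2]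
        rw [show 2 * Nat.succ k = (2 * k + 1) + 1 by omega]
        simp

-- ===== VERDICT (by name: the statement is the Claim_ definition above) =====
theorem get_odd_and_even_pair_spec : Claim_equal_get_odd_and_even_pair := by
  intro content _
  unfold Spec_get_odd_and_even_pair
  rw [a_eq_pairs, alt_eq_pairs]
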